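-- pv_equiv track=rewrite | github.com/andy814/LeetCode | Contest/LeetCodeW277.py | findLonely3
-- ===== SOURCE A (Python) =====
-- from typing import List
--
-- import collections
--
-- def findLonely3(nums: List[int]) -> List[int]: # O(n)
--     check = collections.defaultdict(int)
--     for i in nums:
--         check[i] += 1
--     ans = []
--     for i in nums:
--         if check[i]==1 and check[i+1]==0 and check[i-1]==0:
--             ans.append(i)
--     return ans
-- ===== SOURCE B (Python) =====
-- from typing import List
--
-- def findLonely3(nums: List[int]) -> List[int]:
--     s = sorted(nums)
--     n = len(s)
--     runs = []
--     i = 0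
--     while i < n:
--         j = i
--         while j < n and s[j] == s[i]:
--             j += 1
--         runs.append((s[i], j - i))
--         i = j
--     lonely = set()
--     prev = None
--     for k in range(len(runs)):
--         v, c = runs[k]
--         if c == 1 and (prev is None or prev != v - 1) and (k + 1 == len(runs) or runs[k + 1][0] != v + 1):
--             lonely.add(v)
--         prev = v
--     return [x for x in nums if x in lonely]
-- ===== Notes on version B (the rewrite author's own statement) =====
-- stated objective: alternative
-- what changed: Replaces the hash-counter lookup scheme by a sort-then-run-length scan: B sorts a copy, groups it into runs, marks values whose run has length 1 and whose neighboring runs are not value±1 as lonely, and filters the original list by that set.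
import Mathlib
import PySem

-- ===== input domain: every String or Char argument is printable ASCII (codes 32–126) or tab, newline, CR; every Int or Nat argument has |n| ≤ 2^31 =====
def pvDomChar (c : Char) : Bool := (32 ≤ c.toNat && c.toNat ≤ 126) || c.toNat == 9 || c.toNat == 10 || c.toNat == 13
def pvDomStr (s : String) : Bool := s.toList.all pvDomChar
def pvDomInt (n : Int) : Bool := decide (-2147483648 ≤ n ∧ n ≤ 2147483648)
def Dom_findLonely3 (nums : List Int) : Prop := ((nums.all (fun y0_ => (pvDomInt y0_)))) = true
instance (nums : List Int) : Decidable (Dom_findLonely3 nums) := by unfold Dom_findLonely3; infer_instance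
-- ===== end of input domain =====

-- B replaces A's hash-counter lookups by a sort-then-run-length scan over a sorted copy (alternative algorithm, same results).


-- ===== PORT A =====
def findLonely3 (nums : List Int) : List Int :=
  -- check = defaultdict(int); for i in nums: check[i] += 1
  let check : PySem.Dict Int Int := nums.foldl (fun d i => d.modify i 0 (· + 1)) PySem.Dict.empty
  -- ans = []; for i in nums: if check[i]==1 and check[i+1]==0 and check[i-1]==0: ans.append(i)
  -- (the defaultdict reads check[i+1] / check[i-1] insert the key with value 0; getD 0 is exact)
  nums.foldl (fun ans i =>
    if check.getD i 0 == 1 && check.getD (i + 1) 0 == 0 && check.getD (i - 1) 0 == 0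
    then ans ++ [i] else ans) []

-- ===== PORT B =====
-- the inner 'while j < n and s[j] == s[i]' / 'i = j' two-pointer grouping: one run per step
def pvRuns : List Int → List (Int × Int)
  | [] => []
  | x :: xs =>
      (x, 1 + (xs.takeWhile (fun y => y == x)).length) :: pvRuns (xs.dropWhile (fun y => y == x))
termination_by s => s.length
decreasing_by
  simpa using Nat.lt_succ_of_le (List.length_dropWhile_le (fun y => y == x) xs)

-- 'for k in range(len(runs)): …' carrying prev and peeking runs[k+1] (= head of the rest)
def pvCollect (acc : PySem.Set Int) (prev : Option Int) : List (Int × Int) → PySem.Set Int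
  | [] => acc
  | (v, c) :: rest =>
      let ok := c == 1
        && (match prev with | none => true | some p => !(p == v - 1))
        && (match rest with | [] => true | (w, _) :: _ => !(w == v + 1))
      pvCollect (if ok then PySem.Set.add acc v else acc) (some v) rest

def findLonely3_alt (nums : List Int) : List Int :=
  let s := PySem.List.sorted nums (fun x => x) false
  let runs := pvRuns s
  let lonely := pvCollect PySem.Set.empty none runs
  nums.filter (fun x => PySem.Set.contains lonely x)

-- ===== PRECONDITION & SPEC =====
def Spec_findLonely3 (nums : List Int) (out : List Int) : Prop := out = findLonely3_alt nums
instance (nums : List Int) (out : List Int) : Decidable (Spec_findLonely3 nums out) := by unfold Spec_findLonely3; infer_instance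

-- ===== CLAIM (what is proved, stated in full; the proofs are below) =====
def Claim_equal_findLonely3 : Prop := ∀ (nums : List Int), Dom_findLonely3 nums → Spec_findLonely3 nums (findLonely3 nums)

-- ===== LEMMAS AND PROOFS =====

-- A computes the filter by the count condition
theorem findLonely3_eq_filter (nums : List Int) :
    findLonely3 nums = nums.filter (fun i =>
      ((nums.count i : Int) == 1) && ((nums.count (i + 1) : Int) == 0) && ((nums.count (i - 1) : Int) == 0)) := by
  unfold findLonely3
  rw [show nums.foldl (fun d i => d.modify i 0 (· + 1)) PySem.Dict.empty = PySem.Dict.counter nums from rfl,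
    PySem.List.foldl_append_if_eq_filter]
  rw [List.nil_append]
  apply List.filter_congr
  intro i _
  simp [PySem.Dict.getD_counter]

theorem drop_gt (x : Int) (xs : List Int) (hs : (x :: xs).Pairwise (· ≤ ·)) :
    ∀ y ∈ xs.dropWhile (fun y => y == x), x < y := by
  induction xs with
  | nil => simp
  | cons a rest ih =>
    rw [List.pairwise_cons] at hs
    obtain ⟨hx, hrest⟩ := hs
    by_cases hax : a = x
    · subst hax
      rw [List.dropWhile_cons_of_pos (by simp)]
      exact ih (List.pairwise_cons.mpr ⟨fun y hy' => hx y (List.mem_cons_of_mem _ hy'),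
        (List.pairwise_cons.mp hrest).2⟩)
    · rw [List.dropWhile_cons_of_neg (by simp [hax])]
      intro y hy
      rw [List.mem_cons] at hy
      rcases hy with rfl | hy
      · exact lt_of_le_of_ne (hx y (by simp)) (Ne.symm hax)
      · calc x < a := lt_of_le_of_ne (hx a (by simp)) (Ne.symm hax)
          _ ≤ y := (List.pairwise_cons.mp hrest).1 y hy

theorem count_split (x : Int) (xs : List Int) (hs : (x :: xs).Pairwise (· ≤ ·)) (v : Int) :
    (x :: xs).count v =
      (if v = x then 1 + (xs.takeWhile (fun y => y == x)).length else 0)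
        + (xs.dropWhile (fun y => y == x)).count v := by
  have hsplit := List.takeWhile_append_dropWhile (p := fun y => y == x) (l := xs)
  have htake : ∀ y ∈ xs.takeWhile (fun y => y == x), y = x := by
    intro y hy
    simpa using List.mem_takeWhile_imp hy
  rw [List.count_cons, ← hsplit, List.count_append]
  by_cases hvx : v = x
  · subst hvx
    have : (xs.takeWhile (fun y => y == v)).count v = (xs.takeWhile (fun y => y == v)).length :=
      List.count_eq_length.mpr (fun b hb => (htake b hb).symm)
    simp [this]
    omega
  · have : (xs.takeWhile (fun y => y == x)).count v = 0 :=
      List.count_eq_zero.mpr (fun hv => hvx (htake v hv))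
    have hxv : ¬ x = v := fun h => hvx h.symm
    simp [this, hvx, hxv]

theorem collect_mem (s : List Int) : s.Pairwise (· ≤ ·) →
    ∀ (acc : PySem.Set Int) (prev : Option Int),
    (∀ p, prev = some p → ∀ y ∈ s, p < y) → ∀ v : Int,
    ((v ∈ pvCollect acc prev (pvRuns s)) ↔
      v ∈ acc ∨ (s.count v = 1 ∧ s.count (v + 1) = 0 ∧ s.count (v - 1) = 0 ∧ prev ≠ some (v - 1))) := by
  induction s using pvRuns.induct with
  | case1 => intro _ acc prev _ v; simp [pvRuns, pvCollect]
  | case2 x xs ih =>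
    intro hs acc prev hprev v
    have hpc := List.pairwise_cons.mp hs
    have hxle : ∀ y ∈ xs, x ≤ y := hpc.1
    have hgt := drop_gt x xs hs
    have hts : (xs.dropWhile (fun y => y == x)).Pairwise (· ≤ ·) :=
      List.Pairwise.sublist (List.dropWhile_sublist _) hpc.2
    set t := xs.dropWhile (fun y => y == x) with ht
    have hcs : ∀ w : Int, (x :: xs).count w =
        (if w = x then 1 + (xs.takeWhile (fun y => y == x)).length else 0) + t.count w :=
      count_split x xs hs
    have hlow : ∀ w : Int, w < x → (x :: xs).count w = 0 := by
      intro w hw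
      refine List.count_eq_zero.mpr (fun hmem => ?_)
      rw [List.mem_cons] at hmem
      rcases hmem with rfl | hmem
      · exact lt_irrefl w hw
      · exact absurd (hxle w hmem) (by omega)
    have htlow : ∀ w : Int, w ≤ x → t.count w = 0 := by
      intro w hw
      exact List.count_eq_zero.mpr (fun hmem => absurd (hgt w hmem) (by omega))
    have hmem_t : ∀ w : Int, w ∈ t → w ∈ x :: xs :=
      fun w hw => List.mem_cons_of_mem _ ((List.dropWhile_sublist _).mem hw)
    -- unfold one step of pvRuns and pvCollect
    rw [pvRuns]
    simp only [pvCollect]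
    -- the next-run test equals "no occurrence of x+1 in t"
    have hnext : (match pvRuns t with
        | [] => true | (w, _) :: _ => !(w == (x + 1))) = decide (t.count (x + 1) = 0) := by
      match htt : t with
      | [] => simp [pvRuns]
      | h :: tt =>
        rw [pvRuns]
        have hh : x < h := hgt h (by simp)
        have hpt := List.pairwise_cons.mp hts
        by_cases hhx : h = x + 1
        · subst hhx
          simp [List.count_cons_self]
        · have hz : (h :: tt).count (x + 1) = 0 := by
            refine List.count_eq_zero.mpr (fun hmem => ?_)
            rw [List.mem_cons] at hmem
            rcases hmem with heq | hmem
            · exact hhx heq.symm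
            · have := hpt.1 _ hmem; omega
          simp [hz, hhx]
    rw [hnext]
    -- recursive call via the inductive hypothesis
    rw [ih hts _ (some x) (fun p hp y hy => by cases hp; exact hgt y hy) v]
    -- membership in the updated accumulator
    have hacc : ∀ b : Bool, (v ∈ (if b then PySem.Set.add acc x else acc)) ↔
        (v ∈ acc ∨ (b = true ∧ v = x)) := by
      intro b; cases b <;> simp [PySem.Set.mem_add]
    rw [hacc]
    have hlen : (0 : Int) ≤ ((xs.takeWhile (fun y => y == x)).length : Int) := Int.natCast_nonneg _
    -- previous-run test as a Prop
    have hprevb : ((match prev with | none => true | some p => !(p == (x - 1))) = true) ↔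
        prev ≠ some (x - 1) := by
      cases prev <;> simp
    constructor
    · rintro ((hA | ⟨hok, rfl⟩) | ⟨h1, h2, h3, hx1⟩)
      · exact Or.inl hA
      · -- the head run is collected: x is lonely
        simp only [Bool.and_eq_true, beq_iff_eq, decide_eq_true_eq] at hok
        obtain ⟨⟨hc1, hp⟩, hn⟩ := hok
        refine Or.inr ⟨?_, ?_, ?_, hprevb.mp (by cases prev <;> simp_all)⟩
        · rw [hcs v, if_pos rfl, htlow v (le_refl v)]; omega
        · rw [hcs (v + 1), if_neg (by omega), hn]
        · exact hlow (v - 1) (by omega)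
      · -- a later run is collected
        have hxv : x ≠ v - 1 := by simpa using hx1
        have hvt : v ∈ t := by
          by_contra hvt
          rw [List.count_eq_zero.mpr hvt] at h1; omega
        have hxltv : x < v := hgt v hvt
        refine Or.inr ⟨?_, ?_, ?_, ?_⟩
        · rw [hcs v, if_neg (by omega)]; omega
        · rw [hcs (v + 1), if_neg (by omega)]; omega
        · rw [hcs (v - 1), if_neg (by omega)]; omega
        · cases prev with
          | none => simp
          | some p =>
            have hpx := hprev p rfl x (List.mem_cons_self)
            simp only [Ne, Option.some.injEq]; omega
    · rintro (hA | ⟨h1, h2, h3, hp⟩)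
      · exact Or.inl (Or.inl hA)
      · by_cases hvx : v = x
        · -- v is the head run
          subst hvx
          refine Or.inl (Or.inr ⟨?_, rfl⟩)
          simp only [Bool.and_eq_true, beq_iff_eq, decide_eq_true_eq]
          rw [hcs v, if_pos rfl, htlow v (le_refl v)] at h1
          rw [hcs (v + 1), if_neg (by omega)] at h2
          refine ⟨⟨by omega, ?_⟩, by omega⟩
          cases prev with
          | none => simp
          | some p => simpa using fun h => hp (by rw [h])
        · -- v lies in a later run
          have hxltv : x < v := by
            by_contra hxv
            have : (x :: xs).count v = 0 := by
              rcases lt_or_eq_of_le (by omega : v ≤ x) with h | h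
              · exact hlow v h
              · exact absurd h hvx
            omega
          have hvx1 : ¬ (v - 1 = x) := by
            intro h; rw [hcs (v - 1), if_pos h] at h3; omega
          refine Or.inr ⟨?_, ?_, ?_, ?_⟩
          · rw [hcs v, if_neg hvx] at h1; omega
          · rw [hcs (v + 1), if_neg (by omega)] at h2; omega
          · rw [hcs (v - 1), if_neg hvx1] at h3; omega
          · simp only [Ne, Option.some.injEq]; omega

-- ===== VERDICT (by name: the statement is the Claim_ definition above) =====
theorem findLonely3_spec : Claim_equal_findLonely3 := by
  intro nums _
  show findLonely3 nums = findLonely3_alt nums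
  rw [findLonely3_eq_filter]
  unfold findLonely3_alt
  apply List.filter_congr
  intro x hx
  have hperm := PySem.List.sorted_perm nums (fun x => x) false
  have hcount : ∀ w : Int, (PySem.List.sorted nums (fun x => x) false).count w = nums.count w :=
    fun w => hperm.count_eq w
  have hmem := collect_mem (PySem.List.sorted nums (fun x => x) false)
    (by simpa using PySem.List.sorted_pairwise nums (fun x => x))
    PySem.Set.empty none (by simp) x
  simp only [hcount] at hmem
  rw [Bool.eq_iff_iff, PySem.Set.contains_iff, hmem]
  simp [PySem.Set.empty]
  omega
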